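-- pv_equiv track=rewrite | github.com/LURKS02/algorithm | algorithm/골드/골드5/1484.py | find_current_weights
-- ===== SOURCE A (Python) =====
-- def find_current_weights(G):
--     answers = []
--
--     for i in range(1, int(G**0.5) + 1):
--         if G % i == 0:
--             d = G // i
--             if (d + i) % 2 == 0:
--                 x = (d + i) // 2
--                 if x**2 - G != 0:
--                     answers.append(x)
--
--     if not answers:
--         return [-1]
--     else:
--         return sorted(answers)
-- ===== SOURCE B (Python) =====
-- def find_current_weights(G):
--     # x*x - y*y = G means G splits into two factors of EQUAL parity (x-y and x+y).
--     # G % 4 == 2 admits no such split.  Otherwise reduce to a kernel K: for odd G the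
--     # factors are both odd and x = (a + G//a) // 2; for G divisible by 4 both are even,
--     # a*b = G//4 and x = a + b.  Instead of trial-testing every candidate divisor the
--     # way A does, factor K into prime powers once and generate its divisor list
--     # multiplicatively, then map each small divisor a (a < K//a) to its x and sort.
--     if G % 4 == 2:
--         return [-1]
--     K = G if G % 2 else G // 4
--     divisors = [1]
--     n, p = K, 2
--     while p * p <= n:
--         if n % p == 0:
--             pe = 1
--             while n % p == 0:
--                 n //= p
--                 pe *= p
--             powers = []
--             q = 1
--             while q <= pe:
--                 powers.append(q)
--                 q *= p
--             divisors = [d * q for d in divisors for q in powers]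
--         p += 1
--     if n > 1:
--         divisors = divisors + [d * n for d in divisors]
--     answers = []
--     for a in divisors:
--         b = K // a
--         if a < b:
--             answers.append((a + b) // 2 if G % 2 else a + b)
--     return sorted(answers) if answers else [-1]
-- ===== Notes on version B (the rewrite author's own statement) =====
-- stated objective: alternative
-- what changed: B replaces A's per-candidate divisibility scan by a mod-4 parity reduction to a kernel K (odd G: K=G; 4|G: K=G//4, G%4==2: no answers) followed by one trial-division prime factorisation of K whose divisor list is generated multiplicatively, each small divisor a<K//a then mapped to its x; A instead tests every i up to isqrt(G) with a per-divisor parity check.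
import Mathlib
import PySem

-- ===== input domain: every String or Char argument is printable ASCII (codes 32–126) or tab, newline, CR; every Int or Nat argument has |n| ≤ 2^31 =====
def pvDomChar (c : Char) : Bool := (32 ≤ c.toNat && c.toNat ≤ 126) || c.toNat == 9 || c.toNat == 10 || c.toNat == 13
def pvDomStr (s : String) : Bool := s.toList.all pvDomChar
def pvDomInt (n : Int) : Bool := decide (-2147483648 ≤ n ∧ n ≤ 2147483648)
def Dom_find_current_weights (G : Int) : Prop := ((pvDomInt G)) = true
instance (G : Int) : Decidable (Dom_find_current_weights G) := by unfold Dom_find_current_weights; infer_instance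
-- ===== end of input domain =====

-- B replaces A's trial-division scan of every candidate divisor by a mod-4 parity reduction
-- and a multiplicative divisor list built from the prime factorisation of the reduced kernel;
-- equivalence is proved on Pre_ (0 ≤ G; on negative G the Python A raises TypeError).

-- ===== PORT A =====
-- int(G**0.5) is ported as Int.sqrt: exact for 0 ≤ G ≤ 2^31 (double sqrt floors to isqrt there).
def find_current_weights (G : Int) : List Int :=
  let answers : List Int :=
    (PySem.List.pyRange 1 (Int.sqrt G + 1) 1).foldl (fun answers i =>
      if PySem.Int.mod G i = 0 then
        let d := PySem.Int.floordiv G i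
        if PySem.Int.mod (d + i) 2 = 0 then
          let x := PySem.Int.floordiv (d + i) 2
          if x ^ 2 - G ≠ 0 then answers ++ [x] else answers
        else answers
      else answers) []
  if answers = [] then [-1] else PySem.List.sorted answers (fun x => x) false

-- ===== PORT B =====
-- termination lemma for the ports' while-loops (cited by name in 'decreasing_by')
lemma pvStrip_dec (n p : Int) (hd : PySem.Int.mod n p = 0) (hp : 2 ≤ p) (hn : 1 ≤ n) :
    (PySem.Int.floordiv n p).toNat < n.toNat ∧ 1 ≤ PySem.Int.floordiv n p := by
  have h0 : 0 < p := by omega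
  rw [PySem.Int.floordiv_eq_ediv_of_pos h0]
  obtain ⟨k, hk⟩ := (PySem.Int.mod_eq_zero_iff_dvd n p).mp hd
  have hk1 : 1 ≤ k := by nlinarith
  have he : n / p = k := by rw [hk, Int.mul_ediv_cancel_left _ (by omega)]
  rw [he]
  have hkn : k < n := by nlinarith
  exact ⟨by omega, hk1⟩

-- port of B's inner loop 'while n % p == 0: n //= p; pe *= p'
-- ('2 ≤ p ∧ 1 ≤ n' is a totality-only guard: it holds whenever the loop is reached)
def pvStrip (n p pe : Int) : Int × Int :=
  if h : PySem.Int.mod n p = 0 ∧ 2 ≤ p ∧ 1 ≤ n then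
    pvStrip (PySem.Int.floordiv n p) p (pe * p)
  else (n, pe)
termination_by n.toNat
decreasing_by exact (pvStrip_dec n p h.1 h.2.1 h.2.2).1

-- port of B's loop 'while q <= pe: powers.append(q); q *= p' ('2 ≤ p ∧ 1 ≤ q' totality-only)
def pvPowers (q pe p : Int) (acc : List Int) : List Int :=
  if h : q ≤ pe ∧ 2 ≤ p ∧ 1 ≤ q then
    pvPowers (q * p) pe p (acc ++ [q])
  else acc
termination_by (pe + 1 - q).toNat
decreasing_by
  have : q * 2 ≤ q * p := by nlinarith [h.2.1, h.2.2]
  omega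

-- termination lemma for the outer loop (the stripped n strictly shrinks)
lemma pvStrip_fst_lt (n p pe : Int) (hd : PySem.Int.mod n p = 0) (hp : 2 ≤ p) (hn : 1 ≤ n) :
    (pvStrip n p pe).1.toNat < n.toNat ∧ 1 ≤ (pvStrip n p pe).1 := by
  rw [pvStrip, dif_pos ⟨hd, hp, hn⟩]
  obtain ⟨hlt, h1⟩ := pvStrip_dec n p hd hp hn
  by_cases h2 : PySem.Int.mod (PySem.Int.floordiv n p) p = 0
  · have := pvStrip_fst_lt (PySem.Int.floordiv n p) p (pe * p) h2 hp h1
    exact ⟨lt_trans this.1 hlt, this.2⟩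
  · rw [pvStrip, dif_neg (by simp [h2])]
    exact ⟨hlt, h1⟩
termination_by n.toNat
decreasing_by exact (pvStrip_dec n p hd hp hn).1

-- port of B's outer loop 'while p * p <= n: …' ('2 ≤ p' totality-only; p starts at 2)
def pvFactor (n p : Int) (divisors : List Int) : Int × List Int :=
  if h : p * p ≤ n ∧ 2 ≤ p then
    if hd : PySem.Int.mod n p = 0 then
      let r := pvStrip n p 1
      let powers := pvPowers 1 r.2 p []
      pvFactor r.1 (p + 1) (divisors.flatMap fun d => powers.map fun q => d * q)
    else pvFactor n (p + 1) divisors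
  else (n, divisors)
termination_by (n.toNat, (n + 1 - p).toNat)
decreasing_by
  · exact Prod.Lex.left _ _ (pvStrip_fst_lt n p 1 hd h.2 (by nlinarith [h.1, h.2])).1
  · have : p ≤ n := le_trans (by nlinarith [h.2]) h.1
    exact Prod.Lex.right _ (by omega)

def find_current_weights_alt (G : Int) : List Int :=
  if PySem.Int.mod G 4 = 2 then [-1]
  else
    let K := if PySem.Int.mod G 2 ≠ 0 then G else PySem.Int.floordiv G 4
    let r := pvFactor K 2 [1]
    let divisors := if 1 < r.1 then r.2 ++ r.2.map (fun d => d * r.1) else r.2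
    let answers := divisors.foldl (fun answers a =>
      let b := PySem.Int.floordiv K a
      if a < b then
        answers ++ [if PySem.Int.mod G 2 ≠ 0 then PySem.Int.floordiv (a + b) 2 else a + b]
      else answers) []
    if answers = [] then [-1] else PySem.List.sorted answers (fun x => x) false

-- ===== PRECONDITION & SPEC =====
-- Pre_ excludes exactly the negative inputs, where Python A raises TypeError (int() of a complex square root).
def Pre_find_current_weights (G : Int) : Prop := 0 ≤ G
instance (G : Int) : Decidable (Pre_find_current_weights G) := by unfold Pre_find_current_weights; infer_instance
def pvWitness_find_current_weights : Int := (45)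

def Spec_find_current_weights (G : Int) (out : List Int) : Prop := out = find_current_weights_alt G
instance (G : Int) (out : List Int) : Decidable (Spec_find_current_weights G out) := by unfold Spec_find_current_weights; infer_instance

-- ===== CLAIM (what is proved, stated in full; the proofs are below) =====
def Claim_equal_find_current_weights : Prop := ∀ (G : Int), Dom_find_current_weights G → Pre_find_current_weights G → Spec_find_current_weights G (find_current_weights G)

-- ===== LEMMAS AND PROOFS =====

-- the value A appends for divisor candidate i : x = (G//i + i) // 2
def pvF (G i : Int) : Int := PySem.Int.floordiv (PySem.Int.floordiv G i + i) 2

-- A's keep-condition as a Bool predicate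
def pvPA (G i : Int) : Bool :=
  decide (PySem.Int.mod G i = 0 ∧ PySem.Int.mod (PySem.Int.floordiv G i + i) 2 = 0 ∧
    (pvF G i) ^ 2 - G ≠ 0)

-- B's keep-condition and emitted value
def pvCB (K a : Int) : Bool := decide (a < PySem.Int.floordiv K a)
def pvG (G K a : Int) : Int :=
  if PySem.Int.mod G 2 ≠ 0 then PySem.Int.floordiv (a + PySem.Int.floordiv K a) 2
  else a + PySem.Int.floordiv K a

-- the common mathematical characterisation of a kept x
def pvSol (G x : Int) : Prop := ∃ y : Int, 1 ≤ y ∧ y < x ∧ x * x - y * y = G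

-- 'L is exactly the positive divisors of K, without duplicates'
def pvDivOK (K : Int) (L : List Int) : Prop :=
  (∀ d : Int, d ∈ L ↔ 0 < d ∧ d ∣ K) ∧ L.Nodup

-- B's post-loop extension step 'if n > 1: divisors = divisors + [d*n for d in divisors]'
def pvExt (r : Int × List Int) : List Int :=
  if 1 < r.1 then r.2 ++ r.2.map (fun d => d * r.1) else r.2

lemma pvStrip_spec (n p pe : Int) (hp : 2 ≤ p) (hn : 1 ≤ n) :
    ∃ e : ℕ, (pvStrip n p pe).2 = pe * p ^ e ∧ n = (pvStrip n p pe).1 * p ^ e ∧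
      ¬ p ∣ (pvStrip n p pe).1 ∧ 1 ≤ (pvStrip n p pe).1 := by
  by_cases hd : PySem.Int.mod n p = 0
  · rw [pvStrip, dif_pos ⟨hd, hp, hn⟩]
    obtain ⟨hlt, h1⟩ := pvStrip_dec n p hd hp hn
    obtain ⟨e, h2, h3, h4, h5⟩ := pvStrip_spec (PySem.Int.floordiv n p) p (pe * p) hp h1
    refine ⟨e + 1, ?_, ?_, h4, h5⟩
    · rw [h2]; ring
    · have h0 : 0 < p := by omega
      obtain ⟨k, hk⟩ := (PySem.Int.mod_eq_zero_iff_dvd n p).mp hd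
      have he' : PySem.Int.floordiv n p = k := by
        rw [PySem.Int.floordiv_eq_ediv_of_pos h0, hk, Int.mul_ediv_cancel_left _ (by omega)]
      rw [he'] at h3 ⊢
      linear_combination hk + p * h3
  · rw [pvStrip, dif_neg (by simp [hd])]
    exact ⟨0, by ring, by ring,
      fun hc => hd ((PySem.Int.mod_eq_zero_iff_dvd n p).mpr hc), hn⟩
termination_by n.toNat
decreasing_by exact (pvStrip_dec n p hd hp hn).1

lemma pvPowers_shape (p : Int) (hp : 2 ≤ p) (e j : ℕ) (acc : List Int) :
    pvPowers (p ^ j) (p ^ e) p acc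
      = acc ++ ((List.range (e + 1 - j)).map (fun i => p ^ (j + i))) := by
  have hp1 : (1:Int) < p := by omega
  by_cases hj : j ≤ e
  · rw [pvPowers, dif_pos ⟨(pow_le_pow_iff_right₀ hp1).mpr hj, hp, one_le_pow₀ (by omega)⟩,
      show p ^ j * p = p ^ (j + 1) from by ring,
      pvPowers_shape p hp e (j + 1) (acc ++ [p ^ j])]
    rw [List.append_assoc]
    congr 1
    rw [show e + 1 - j = (e - j) + 1 from by omega, List.range_succ_eq_map,
      List.map_cons, List.map_map, show e + 1 - (j + 1) = e - j from by omega]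
    simp only [Nat.add_zero, List.singleton_append]
    congr 1
    apply List.map_congr_left
    intro i _
    simp only [Function.comp_apply, Nat.succ_eq_add_one]
    rw [show j + (i + 1) = j + 1 + i from by omega]
  · rw [pvPowers, dif_neg (by
      intro hc
      exact hj ((pow_le_pow_iff_right₀ hp1).mp hc.1))]
    rw [show e + 1 - j = 0 from by omega]
    simp
termination_by e + 1 - j
decreasing_by omega

lemma pvPowers_spec (p : Int) (hp : 2 ≤ p) (e : ℕ) :
    (∀ x : Int, x ∈ pvPowers 1 (p ^ e) p [] ↔ ∃ j ≤ e, x = p ^ j) ∧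
      (pvPowers 1 (p ^ e) p []).Nodup := by
  have hp1 : (1:Int) < p := by omega
  have hs := pvPowers_shape p hp e 0 []
  rw [pow_zero] at hs
  rw [hs]
  constructor
  · intro x
    simp only [List.nil_append, List.mem_map, List.mem_range]
    constructor
    · rintro ⟨i, hi, rfl⟩; exact ⟨i, by omega, by rw [Nat.zero_add]⟩
    · rintro ⟨j, hj, rfl⟩; exact ⟨j, by omega, by rw [Nat.zero_add]⟩
  · simp only [List.nil_append]
    refine List.Nodup.map_on ?_ (List.nodup_range)
    intro i _ i' _ hii
    simp only [Nat.zero_add] at hii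
    have := (pow_le_pow_iff_right₀ hp1).mp (le_of_eq hii)
    have := (pow_le_pow_iff_right₀ hp1).mp (le_of_eq hii.symm)
    omega

-- a number with no divisor in [2, p) and below p² is prime
lemma pv_prime_of_no_small (v p : Int) (h2 : 1 < v) (hp : 2 ≤ p) (hlt : v < p * p)
    (hsmall : ∀ q : Int, 2 ≤ q → q < p → ¬ q ∣ v) : Prime v := by
  rw [Int.prime_iff_natAbs_prime]
  have hva : (v.natAbs : Int) = v := Int.natAbs_of_nonneg (by omega)
  refine Nat.prime_def_le_sqrt.mpr ⟨by omega, fun m h2m hms hdvd => ?_⟩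
  have hmm : m * m ≤ v.natAbs := Nat.le_sqrt.mp hms
  have hmmZ : (m : Int) * m ≤ v := by
    have : ((m * m : ℕ) : Int) ≤ ((v.natAbs : ℕ) : Int) := by exact_mod_cast hmm
    push_cast at this
    omega
  have hmp : (m : Int) < p := by nlinarith [show (0:Int) ≤ (m:Int) from by positivity]
  have hdZ : (m : Int) ∣ v := by
    have := Int.natCast_dvd_natCast.mpr hdvd
    rwa [hva] at this
  exact hsmall m (by exact_mod_cast h2m) hmp hdZ

-- distinct (divisor, power) pairs give distinct products when p does not divide the divisors
lemma pv_prod_inj (p a a' : Int) (j j' : ℕ) (hp : 2 ≤ p) (hpa : ¬ p ∣ a) (hpa' : ¬ p ∣ a')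
    (heq : a * p ^ j = a' * p ^ j') : a = a' ∧ j = j' := by
  rcases le_total j j' with hle | hle
  · have hpj : (p : Int) ^ j ≠ 0 := pow_ne_zero _ (by omega)
    have ha : a = a' * p ^ (j' - j) := by
      have h1 : a * p ^ j = a' * p ^ (j' - j) * p ^ j := by
        rw [mul_assoc, ← pow_add, show j' - j + j = j' from by omega]
        exact heq
      exact mul_right_cancel₀ hpj h1
    rcases Nat.eq_or_lt_of_le hle with h | h
    · constructor
      · rw [ha, show j' - j = 0 from by omega, pow_zero, mul_one]
      · exact h
    · exfalso
      exact hpa (ha ▸ Dvd.dvd.mul_left (dvd_pow_self p (by omega : j' - j ≠ 0)) a')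
  · have hpj : (p : Int) ^ j' ≠ 0 := pow_ne_zero _ (by omega)
    have ha : a' = a * p ^ (j - j') := by
      have h1 : a' * p ^ j' = a * p ^ (j - j') * p ^ j' := by
        rw [mul_assoc, ← pow_add, show j - j' + j' = j from by omega]
        exact heq.symm
      exact mul_right_cancel₀ hpj h1
    rcases Nat.eq_or_lt_of_le hle with h | h
    · constructor
      · rw [ha, show j - j' = 0 from by omega, pow_zero, mul_one]
      · exact h.symm
    · exfalso
      exact hpa' (ha ▸ Dvd.dvd.mul_left (dvd_pow_self p (by omega : j - j' ≠ 0)) a)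

lemma pvFactor_spec (n p : Int) (divisors : List Int) (K m : Int)
    (hn : 1 ≤ n) (hp : 2 ≤ p) (hm : 1 ≤ m) (hK : m * n = K)
    (hco : IsCoprime m n)
    (hsmall : ∀ q : Int, 2 ≤ q → q < p → ¬ q ∣ n)
    (hmem : ∀ d : Int, d ∈ divisors ↔ 0 < d ∧ d ∣ m)
    (hnd : divisors.Nodup) :
    pvDivOK K (pvExt (pvFactor n p divisors)) := by
  rw [pvFactor]
  by_cases hcond : p * p ≤ n
  · rw [dif_pos ⟨hcond, hp⟩]
    by_cases hd : PySem.Int.mod n p = 0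
    · rw [dif_pos hd]
      show pvDivOK K (pvExt (pvFactor (pvStrip n p 1).1 (p + 1)
        (divisors.flatMap fun d => (pvPowers 1 (pvStrip n p 1).2 p []).map fun q => d * q)))
      have hpn : p ∣ n := (PySem.Int.mod_eq_zero_iff_dvd n p).mp hd
      obtain ⟨e, hpe, hneq, hnp, hr1⟩ := pvStrip_spec n p 1 hp hn
      rw [one_mul] at hpe
      rw [hpe]
      obtain ⟨hPmem, hPnd⟩ := pvPowers_spec p hp e
      have hpP : Prime p :=
        pv_prime_of_no_small p p (by omega) hp (by nlinarith)
          (fun q h2 hq hdq => hsmall q h2 hq (dvd_trans hdq hpn))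
      have hr1dvd : (pvStrip n p 1).1 ∣ n := ⟨p ^ e, hneq⟩
      have hcomp : IsCoprime m p := IsCoprime.of_isCoprime_of_dvd_right hco hpn
      have hpm : ¬ p ∣ m := by
        intro hc
        have := IsCoprime.isUnit_of_dvd' hcomp hc (dvd_refl p)
        rcases Int.isUnit_eq_one_or this with h | h <;> omega
      have hppos : (0:Int) < p ^ e := by positivity
      have hpa : ∀ a : Int, a ∣ m → ¬ p ∣ a :=
        fun a ha hc => hpm (dvd_trans hc ha)
      refine pvFactor_spec (pvStrip n p 1).1 (p + 1) _ K (m * p ^ e) hr1 (by omega)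
        (by nlinarith [hppos, hm]) (by linear_combination hK - m * hneq)
        ?_ ?_ ?_ ?_
      · refine IsCoprime.mul_left (IsCoprime.of_isCoprime_of_dvd_right hco hr1dvd) ?_
        exact IsCoprime.pow_left ((Prime.coprime_iff_not_dvd hpP).mpr hnp)
      · intro q h2 hq hdq
        rcases lt_or_eq_of_le (show q ≤ p from by omega) with h | h
        · exact hsmall q h2 h (dvd_trans hdq hr1dvd)
        · exact hnp (h ▸ hdq)
      · intro d
        rw [List.mem_flatMap]
        constructor
        · rintro ⟨a, ha, hda⟩
          obtain ⟨x, hx, rfl⟩ := List.mem_map.mp hda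
          obtain ⟨ha0, ham⟩ := (hmem a).mp ha
          obtain ⟨j, hj, rfl⟩ := (hPmem x).mp hx
          exact ⟨by positivity, mul_dvd_mul ham (pow_dvd_pow p hj)⟩
        · rintro ⟨hd0, hdm⟩
          obtain ⟨a, b, ham, hbp, rfl⟩ := exists_dvd_and_dvd_of_dvd_mul hdm
          obtain ⟨j, hj, hass⟩ := (dvd_prime_pow hpP e).mp hbp
          have hpj : (0:Int) < p ^ j := by positivity
          rcases Int.associated_iff.mp hass with rfl | rfl
          · have ha0 : 0 < a := by nlinarith
            exact ⟨a, (hmem a).mpr ⟨ha0, ham⟩,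
              List.mem_map.mpr ⟨p ^ j, (hPmem _).mpr ⟨j, hj, rfl⟩, rfl⟩⟩
          · have ha0 : 0 < -a := by nlinarith
            refine ⟨-a, (hmem (-a)).mpr ⟨ha0, (neg_dvd).mpr ham⟩,
              List.mem_map.mpr ⟨p ^ j, (hPmem _).mpr ⟨j, hj, rfl⟩, by ring⟩⟩
      · rw [List.nodup_flatMap]
        constructor
        · intro a ha
          have ha0 : 0 < a := ((hmem a).mp ha).1
          exact List.Nodup.map (fun x y hxy =>
            mul_left_cancel₀ (by omega : a ≠ 0) hxy) hPnd
        · refine List.Pairwise.imp_of_mem ?_ hnd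
          intro a a' ha ha' hne z hz hz'
          obtain ⟨x, hx, rfl⟩ := List.mem_map.mp hz
          obtain ⟨x', hx', hzz⟩ := List.mem_map.mp hz'
          obtain ⟨j, hj, rfl⟩ := (hPmem x).mp hx
          obtain ⟨j', hj', rfl⟩ := (hPmem x').mp hx'
          have := pv_prod_inj p a a' j j' hp (hpa a ((hmem a).mp ha).2)
            (hpa a' ((hmem a').mp ha').2) hzz.symm
          exact hne this.1
    · rw [dif_neg hd]
      refine pvFactor_spec n (p + 1) divisors K m hn (by omega) hm hK hco ?_ hmem hnd
      intro q h2 hq hdq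
      rcases lt_or_eq_of_le (show q ≤ p from by omega) with h | h
      · exact hsmall q h2 h hdq
      · exact hd ((PySem.Int.mod_eq_zero_iff_dvd n p).mpr (h ▸ hdq))
  · rw [dif_neg (by intro hc; exact hcond hc.1)]
    by_cases hn1 : n = 1
    · subst hn1
      unfold pvExt
      rw [if_neg (by norm_num)]
      rw [mul_one] at hK
      subst hK
      exact ⟨hmem, hnd⟩
    · have hn2 : 1 < n := by omega
      have hprime : Prime n := pv_prime_of_no_small n p hn2 hp (by omega) hsmall
      have hnm : ¬ n ∣ m := by
        intro hc
        have := IsCoprime.isUnit_of_dvd' hco hc (dvd_refl n)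
        rcases Int.isUnit_eq_one_or this with h | h <;> omega
      unfold pvExt
      rw [if_pos (show 1 < (n, divisors).1 from hn2)]
      constructor
      · intro d
        simp only [List.mem_append, List.mem_map]
        constructor
        · rintro (hdm | ⟨a, ha, rfl⟩)
          · obtain ⟨h0, hm'⟩ := (hmem d).mp hdm
            exact ⟨h0, hK ▸ Dvd.dvd.mul_right hm' n⟩
          · obtain ⟨h0, hm'⟩ := (hmem a).mp ha
            exact ⟨by positivity, hK ▸ mul_dvd_mul hm' (dvd_refl n)⟩
        · rintro ⟨hd0, hdK⟩
          rw [← hK] at hdK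
          by_cases hnd' : n ∣ d
          · obtain ⟨c, rfl⟩ := hnd'
            have hc0 : 0 < c := by nlinarith
            have : c * n ∣ m * n := by rwa [mul_comm n c] at hdK
            have hcm : c ∣ m := (mul_dvd_mul_iff_right (by omega : n ≠ 0)).mp this
            exact Or.inr ⟨c, (hmem c).mpr ⟨hc0, hcm⟩, mul_comm c n⟩
          · have hcop : IsCoprime d n := by
              have := (Prime.coprime_iff_not_dvd hprime).mpr hnd'
              exact this.symm
            exact Or.inl ((hmem d).mpr ⟨hd0, IsCoprime.dvd_of_dvd_mul_right hcop hdK⟩)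
      · refine List.Nodup.append hnd (List.Nodup.map (fun x y hxy =>
          mul_right_cancel₀ (by omega : n ≠ 0) hxy) hnd) ?_
        intro d hdm hdmap
        obtain ⟨a, ha, rfl⟩ := List.mem_map.mp hdmap
        have h1 := ((hmem (a * n)).mp hdm).2
        exact hnm (dvd_trans (Dvd.dvd.mul_left (dvd_refl n) a) h1)
termination_by (n.toNat, (n + 1 - p).toNat)
decreasing_by
  · exact Prod.Lex.left _ _ (pvStrip_fst_lt n p 1 hd hp (by nlinarith)).1
  · have : p ≤ n := le_trans (by nlinarith) hcond
    exact Prod.Lex.right _ (by omega)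

lemma pv_foldA (G : Int) (l : List Int) (acc : List Int) :
    l.foldl (fun answers i =>
      if PySem.Int.mod G i = 0 then
        let d := PySem.Int.floordiv G i
        if PySem.Int.mod (d + i) 2 = 0 then
          let x := PySem.Int.floordiv (d + i) 2
          if x ^ 2 - G ≠ 0 then answers ++ [x] else answers
        else answers
      else answers) acc
    = acc ++ (l.filter (pvPA G)).map (pvF G) := by
  induction l generalizing acc with
  | nil => simp
  | cons a l ih =>
    rw [List.foldl_cons, List.filter_cons, ih]
    by_cases h1 : a ∣ G <;>
      by_cases h2 : (2:Int) ∣ PySem.Int.floordiv G a + a <;>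
      by_cases h3 : ((PySem.Int.floordiv G a + a) / 2) ^ 2 - G = 0 <;>
      simp [pvPA, pvF, h1, h2, h3, PySem.Int.mod_eq_zero_iff_dvd]

lemma pv_foldB (G K : Int) (l : List Int) (acc : List Int) :
    l.foldl (fun answers a =>
      let b := PySem.Int.floordiv K a
      if a < b then
        answers ++ [if PySem.Int.mod G 2 ≠ 0 then PySem.Int.floordiv (a + b) 2 else a + b]
      else answers) acc
    = acc ++ (l.filter (pvCB K)).map (pvG G K) := by
  induction l generalizing acc with
  | nil => simp
  | cons a l ih =>
    rw [List.foldl_cons, List.filter_cons, ih]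
    by_cases h : a < PySem.Int.floordiv K a <;> simp [pvCB, pvG, h]

-- i² ≤ G for a candidate i ≤ isqrt(G)
lemma pv_sq_le (G b : Int) (hG : 0 ≤ G) (hb1 : 0 < b) (hbs : b ≤ Int.sqrt G) : b * b ≤ G := by
  have h1 : b.toNat ≤ Nat.sqrt G.toNat := by
    have : (b.toNat : Int) ≤ ((Nat.sqrt G.toNat : Nat) : Int) := by
      rw [Int.toNat_of_nonneg hb1.le]; exact hbs
    exact_mod_cast this
  have h2 : b.toNat * b.toNat ≤ G.toNat := Nat.le_sqrt.mp h1
  have h3 : ((b.toNat * b.toNat : Nat) : Int) ≤ ((G.toNat : Nat) : Int) := by exact_mod_cast h2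
  push_cast at h3
  rw [Int.toNat_of_nonneg hb1.le, Int.toNat_of_nonneg hG] at h3
  exact h3

-- and conversely: i² ≤ G forces i ≤ isqrt(G)
lemma pv_le_sqrt (G b : Int) (hb : 0 ≤ b) (h : b * b ≤ G) : b ≤ Int.sqrt G := by
  have hG : 0 ≤ G := le_trans (mul_self_nonneg b) h
  have h1 : b.toNat * b.toNat ≤ G.toNat := by
    have : ((b.toNat * b.toNat : Nat) : Int) ≤ ((G.toNat : Nat) : Int) := by
      push_cast
      rw [Int.toNat_of_nonneg hb, Int.toNat_of_nonneg hG]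
      exact h
    exact_mod_cast this
  have h2 : b.toNat ≤ Nat.sqrt G.toNat := Nat.le_sqrt.mpr h1
  have h3 : ((b.toNat : Nat) : Int) ≤ ((Nat.sqrt G.toNat : Nat) : Int) := by exact_mod_cast h2
  rw [Int.toNat_of_nonneg hb] at h3
  exact h3

-- membership in A's (unsorted) answer list is exactly pvSol
lemma pv_memA (G x : Int) (hG : 1 ≤ G) :
    x ∈ ((PySem.List.pyRange 1 (Int.sqrt G + 1) 1).filter (pvPA G)).map (pvF G) ↔ pvSol G x := by
  rw [List.mem_map]
  constructor
  · rintro ⟨i, hi, rfl⟩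
    obtain ⟨hiR, hiP⟩ := List.mem_filter.mp hi
    obtain ⟨hi1, hi2⟩ := PySem.List.mem_pyRange_one.mp hiR
    have hi0 : 0 < i := by omega
    have hsq : i * i ≤ G := pv_sq_le G i (by omega) hi0 (by omega)
    simp only [pvPA, decide_eq_true_eq, PySem.Int.mod_eq_zero_iff_dvd] at hiP
    obtain ⟨hdvd, heven, hne⟩ := hiP
    have hfd : PySem.Int.floordiv G i = G / i := PySem.Int.floordiv_eq_ediv_of_pos hi0
    have hdi : G / i * i = G := Int.ediv_mul_cancel hdvd
    have hdge : i ≤ G / i := by nlinarith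
    obtain ⟨k, hk⟩ := hfd ▸ heven
    have hx : pvF G i = k := by
      simp only [pvF, hfd, hk, PySem.Int.floordiv_eq_ediv_of_pos (show (0:Int) < 2 by norm_num)]
      exact Int.mul_ediv_cancel_left k two_ne_zero
    rw [hx] at hne ⊢
    have hkne : k * k ≠ G := by
      intro hc; exact hne (by rw [pow_two]; omega)
    have hgt : i < G / i := by
      rcases lt_or_eq_of_le hdge with h | h
      · exact h
      · exact absurd (by nlinarith : k * k = G) hkne
    refine ⟨k - i, by omega, by omega, ?_⟩
    nlinarith [hk, hdi]
  · rintro ⟨y, hy1, hyx, hxy⟩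
    have hi0 : 0 < x - y := by omega
    have hid : (x - y) * (x + y) = G := by ring_nf; linarith [hxy]
    have hdvd : (x - y) ∣ G := ⟨x + y, hid.symm⟩
    have hfd : PySem.Int.floordiv G (x - y) = x + y := by
      rw [PySem.Int.floordiv_eq_ediv_of_pos hi0, ← hid,
        Int.mul_ediv_cancel_left _ (by omega : (x - y) ≠ 0)]
    have hsq : (x - y) * (x - y) ≤ G := by nlinarith
    refine ⟨x - y, List.mem_filter.mpr ⟨PySem.List.mem_pyRange_one.mpr
      ⟨by omega, by have := pv_le_sqrt G (x - y) (by omega) hsq; omega⟩, ?_⟩, ?_⟩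
    · simp only [pvPA, decide_eq_true_eq, PySem.Int.mod_eq_zero_iff_dvd, hfd]
      refine ⟨hdvd, ⟨x, by ring⟩, ?_⟩
      have hx : pvF G (x - y) = x := by
        simp only [pvF, hfd, PySem.Int.floordiv_eq_ediv_of_pos (show (0:Int) < 2 by norm_num),
          show x + y + (x - y) = x * 2 from by ring]
        exact Int.mul_ediv_cancel _ two_ne_zero
      rw [hx]
      intro hc
      have : y * y = 0 := by rw [pow_two] at hc; omega
      nlinarith
    · simp only [pvF, hfd, PySem.Int.floordiv_eq_ediv_of_pos (show (0:Int) < 2 by norm_num),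
        show x + y + (x - y) = x * 2 from by ring]
      exact Int.mul_ediv_cancel _ two_ne_zero

-- two factorisations of K with equal factor sums and the small factor first coincide
lemma pv_pair_eq (a b a' b' : Int) (hs : a + b = a' + b') (hp : a * b = a' * b')
    (h1 : a < b) (h2 : a' < b') : a = a' := by
  have h0 : (a - a') * (a - b') = 0 := by linear_combination a * hs - hp
  rcases mul_eq_zero.mp h0 with h | h
  · omega
  · omega

-- membership in B's (unsorted) answer list is exactly pvSol, and that list has no duplicates
lemma pv_memB (G K : Int) (L : List Int) (hG : 1 ≤ G) (hDiv : pvDivOK K L)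
    (hcase : (PySem.Int.mod G 2 ≠ 0 ∧ K = G) ∨
      (PySem.Int.mod G 2 = 0 ∧ PySem.Int.mod G 4 = 0 ∧ K = PySem.Int.floordiv G 4)) :
    (∀ x : Int, x ∈ (L.filter (pvCB K)).map (pvG G K) ↔ pvSol G x) ∧
      ((L.filter (pvCB K)).map (pvG G K)).Nodup := by
  obtain ⟨hLmem, hLnd⟩ := hDiv
  have hm2 : PySem.Int.mod G 2 = G % 2 := PySem.Int.mod_eq_emod_of_pos (by norm_num)
  have hm4 : PySem.Int.mod G 4 = G % 4 := PySem.Int.mod_eq_emod_of_pos (by norm_num)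
  have hK4 : K = G ∨ (G % 4 = 0 ∧ K = G / 4) := by
    rcases hcase with ⟨-, h⟩ | ⟨-, h4, h⟩
    · exact Or.inl h
    · exact Or.inr ⟨by omega, by rw [h, PySem.Int.floordiv_eq_ediv_of_pos (by norm_num)]⟩
  have hoddK : PySem.Int.mod G 2 ≠ 0 → K = G := by
    rcases hcase with ⟨h, hk⟩ | ⟨h, -, -⟩
    · exact fun _ => hk
    · intro hc; exact absurd h hc
  have hevenK : PySem.Int.mod G 2 = 0 → (G % 4 = 0 ∧ K = G / 4) := by
    rcases hcase with ⟨h, -⟩ | ⟨-, h4, hk⟩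
    · intro hc; exact absurd hc h
    · exact fun _ => ⟨by omega, by rw [hk, PySem.Int.floordiv_eq_ediv_of_pos (by norm_num)]⟩
  have hK1 : 1 ≤ K := by rcases hK4 with h | ⟨h4, h⟩ <;> omega
  -- the two directions of the characterisation
  have fwd : ∀ a ∈ L.filter (pvCB K), pvSol G (pvG G K a) := by
    intro a haf
    obtain ⟨ha, hcb⟩ := List.mem_filter.mp haf
    obtain ⟨ha0, haK⟩ := (hLmem a).mp ha
    have hb : PySem.Int.floordiv K a = K / a := PySem.Int.floordiv_eq_ediv_of_pos ha0
    have hab : a * (K / a) = K := Int.mul_ediv_cancel' haK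
    have hlt : a < K / a := by
      have := of_decide_eq_true hcb
      rwa [hb] at this
    by_cases hodd : PySem.Int.mod G 2 ≠ 0
    · have hKG : K = G := hoddK hodd
      have hG2 : G % 2 ≠ 0 := by rw [← hm2]; exact hodd
      rcases Int.even_or_odd a with ⟨u, hu⟩ | ⟨u, hu⟩
      · exfalso
        have : (2:Int) ∣ G := ⟨u * (K / a), by linear_combination -hKG - hab + (K / a) * hu⟩
        omega
      rcases Int.even_or_odd (K / a) with ⟨v, hv⟩ | ⟨v, hv⟩
      · exfalso
        have : (2:Int) ∣ G := ⟨a * v, by linear_combination -hKG - hab + a * hv⟩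
        omega
      have hxval : pvG G K a = u + v + 1 := by
        simp only [pvG, if_pos hodd, hb]
        rw [show a + K / a = (u + v + 1) * 2 from by omega,
          PySem.Int.floordiv_eq_ediv_of_pos (show (0:Int) < 2 from by norm_num),
          Int.mul_ediv_cancel _ two_ne_zero]
      rw [hxval]
      refine ⟨v - u, by omega, by omega, ?_⟩
      have : a * (K / a) = G := by rw [hab, hKG]
      nlinarith [this, hu, hv]
    · rw [not_ne_iff] at hodd
      obtain ⟨h4, hKG⟩ := hevenK hodd
      have hxval : pvG G K a = a + K / a := by
        simp only [pvG, if_neg (show ¬ PySem.Int.mod G 2 ≠ 0 from fun hc => hc hodd), hb]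
      rw [hxval]
      refine ⟨K / a - a, by omega, by omega, ?_⟩
      have h4K : 4 * K = G := by rw [hKG]; omega
      nlinarith [hab, h4K]
  have bwd : ∀ x : Int, pvSol G x → x ∈ (L.filter (pvCB K)).map (pvG G K) := by
    rintro x ⟨y, hy1, hyx, hxy⟩
    have hi0 : 0 < x - y := by omega
    have hid : (x - y) * (x + y) = G := by ring_nf; linarith [hxy]
    by_cases hodd : PySem.Int.mod G 2 ≠ 0
    · have hKG : K = G := hoddK hodd
      have hG2 : G % 2 ≠ 0 := by rw [← hm2]; exact hodd
      rcases Int.even_or_odd (x - y) with ⟨u, hu⟩ | ⟨u, hu⟩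
      · exfalso
        have : (2:Int) ∣ G := ⟨u * (x + y), by linear_combination -hid + (x + y) * hu⟩
        omega
      have hbval : PySem.Int.floordiv K (x - y) = x + y := by
        rw [PySem.Int.floordiv_eq_ediv_of_pos hi0, hKG, ← hid,
          Int.mul_ediv_cancel_left _ (by omega : (x - y) ≠ 0)]
      refine List.mem_map.mpr ⟨x - y, List.mem_filter.mpr ⟨(hLmem _).mpr
        ⟨hi0, hKG ▸ ⟨x + y, hid.symm⟩⟩, decide_eq_true (by rw [hbval]; omega)⟩, ?_⟩
      simp only [pvG, if_pos hodd, hbval]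
      rw [show x - y + (x + y) = x * 2 from by ring,
        PySem.Int.floordiv_eq_ediv_of_pos (show (0:Int) < 2 from by norm_num),
        Int.mul_ediv_cancel _ two_ne_zero]
    · rw [not_ne_iff] at hodd
      obtain ⟨h4, hKG⟩ := hevenK hodd
      have hG2 : G % 2 = 0 := by rw [← hm2]; exact hodd
      rcases Int.even_or_odd (x - y) with ⟨u, hu⟩ | ⟨u, hu⟩
      · -- both factors even: x - y = 2u, x + y = 2(u + y); u*(u+y) = K
        have hprod : 4 * (u * (u + y)) = G := by
          linear_combination hid - (x + y + 2 * u) * hu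
        have hu1 : 1 ≤ u := by omega
        have hKval : K = u * (u + y) := by omega
        have hbval : PySem.Int.floordiv K u = u + y := by
          rw [PySem.Int.floordiv_eq_ediv_of_pos (by omega), hKval,
            Int.mul_ediv_cancel_left _ (by omega : u ≠ 0)]
        refine List.mem_map.mpr ⟨u, List.mem_filter.mpr ⟨(hLmem _).mpr
          ⟨by omega, hKval ▸ ⟨u + y, rfl⟩⟩, decide_eq_true (by rw [hbval]; omega)⟩, ?_⟩
        simp only [pvG, if_neg (show ¬ PySem.Int.mod G 2 ≠ 0 from fun hc => hc hodd), hbval]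
        omega
      · exfalso
        have hG1 : G = 2 * (2 * u * u + 2 * u * y + 2 * u + y) + 1 := by
          linear_combination -hid + (x + y + 2 * u + 1) * hu
        omega
  refine ⟨fun x => ⟨?_, bwd x⟩, ?_⟩
  · intro hx
    obtain ⟨a, haf, rfl⟩ := List.mem_map.mp hx
    exact fwd a haf
  · refine List.Nodup.map_on ?_ (hLnd.filter _)
    intro a haf a' haf' heq
    obtain ⟨ha, hcb⟩ := List.mem_filter.mp haf
    obtain ⟨ha', hcb'⟩ := List.mem_filter.mp haf'
    obtain ⟨ha0, haK⟩ := (hLmem a).mp ha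
    obtain ⟨ha0', haK'⟩ := (hLmem a').mp ha'
    have hb : PySem.Int.floordiv K a = K / a := PySem.Int.floordiv_eq_ediv_of_pos ha0
    have hb' : PySem.Int.floordiv K a' = K / a' := PySem.Int.floordiv_eq_ediv_of_pos ha0'
    have hab : a * (K / a) = K := Int.mul_ediv_cancel' haK
    have hab' : a' * (K / a') = K := Int.mul_ediv_cancel' haK'
    have hlt : a < K / a := by have := of_decide_eq_true hcb; rwa [hb] at this
    have hlt' : a' < K / a' := by have := of_decide_eq_true hcb'; rwa [hb'] at this
    by_cases hodd : PySem.Int.mod G 2 ≠ 0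
    · have hG2 : G % 2 ≠ 0 := by rw [← hm2]; exact hodd
      have hKG : K = G := hoddK hodd
      have heven : (2:Int) ∣ a + K / a := by
        rcases Int.even_or_odd a with ⟨u, hu⟩ | ⟨u, hu⟩
        · exfalso
          have : (2:Int) ∣ G := ⟨u * (K / a), by linear_combination -hKG - hab + (K / a) * hu⟩
          omega
        rcases Int.even_or_odd (K / a) with ⟨v, hv⟩ | ⟨v, hv⟩
        · exfalso
          have : (2:Int) ∣ G := ⟨a * v, by linear_combination -hKG - hab + a * hv⟩
          omega
        exact ⟨u + v + 1, by omega⟩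
      have heven' : (2:Int) ∣ a' + K / a' := by
        rcases Int.even_or_odd a' with ⟨u, hu⟩ | ⟨u, hu⟩
        · exfalso
          have : (2:Int) ∣ G := ⟨u * (K / a'), by linear_combination -hKG - hab' + (K / a') * hu⟩
          omega
        rcases Int.even_or_odd (K / a') with ⟨v, hv⟩ | ⟨v, hv⟩
        · exfalso
          have : (2:Int) ∣ G := ⟨a' * v, by linear_combination -hKG - hab' + a' * hv⟩
          omega
        exact ⟨u + v + 1, by omega⟩
      simp only [pvG, if_pos hodd, hb, hb'] at heq
      rw [PySem.Int.floordiv_eq_ediv_of_pos (show (0:Int) < 2 from by norm_num),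
        PySem.Int.floordiv_eq_ediv_of_pos (show (0:Int) < 2 from by norm_num)] at heq
      have hsum : a + K / a = a' + K / a' := by
        obtain ⟨s, hs⟩ := heven
        obtain ⟨s', hs'⟩ := heven'
        rw [hs, hs'] at heq ⊢
        rw [show (2:Int) * s = s * 2 from by ring, show (2:Int) * s' = s' * 2 from by ring,
          Int.mul_ediv_cancel _ two_ne_zero, Int.mul_ediv_cancel _ two_ne_zero] at heq
        omega
      exact pv_pair_eq a (K / a) a' (K / a') hsum (by rw [hab, hab']) hlt hlt'
    · rw [not_ne_iff] at hodd
      simp only [pvG, if_neg (show ¬ PySem.Int.mod G 2 ≠ 0 from fun hc => hc hodd), hb, hb'] at heq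
      exact pv_pair_eq a (K / a) a' (K / a') heq (by rw [hab, hab']) hlt hlt'

-- a solution forces G ≢ 2 (mod 4)
lemma pv_no_sol_mod2 (G x : Int) (h : PySem.Int.mod G 4 = 2) : ¬ pvSol G x := by
  rintro ⟨y, hy1, hyx, hxy⟩
  have hm4 : G % 4 = 2 := by
    rw [← PySem.Int.mod_eq_emod_of_pos (show (0:Int) < 4 from by norm_num)]; exact h
  have hid : (x - y) * (x + y) = G := by ring_nf; linarith [hxy]
  rcases Int.even_or_odd (x - y) with ⟨u, hu⟩ | ⟨u, hu⟩
  · have : (4:Int) ∣ G := ⟨u * (u + y), by linear_combination -hid + (x + y + 2 * u) * hu⟩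
    omega
  · have : (2:Int) ∣ G - 1 := ⟨2 * u * u + 2 * u * y + 2 * u + y, by
      linear_combination -hid + (x + y + 2 * u + 1) * hu⟩
    omega

-- the kept x values strictly decrease along A's ascending candidate scan
lemma pv_dec (G a b : Int) (hG : 0 ≤ G)
    (ha : a ∈ (PySem.List.pyRange 1 (Int.sqrt G + 1) 1).filter (pvPA G))
    (hb : b ∈ (PySem.List.pyRange 1 (Int.sqrt G + 1) 1).filter (pvPA G))
    (hab : a < b) : pvF G b < pvF G a := by
  obtain ⟨haR, haP⟩ := List.mem_filter.mp ha
  obtain ⟨hbR, hbP⟩ := List.mem_filter.mp hb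
  obtain ⟨ha1, ha2⟩ := PySem.List.mem_pyRange_one.mp haR
  obtain ⟨hb1, hb2⟩ := PySem.List.mem_pyRange_one.mp hbR
  have ha0 : 0 < a := by omega
  have hb0 : 0 < b := by omega
  have hbsq : b * b ≤ G := pv_sq_le G b hG hb0 (by omega)
  have hfa : PySem.Int.floordiv G a = G / a := PySem.Int.floordiv_eq_ediv_of_pos ha0
  have hfb : PySem.Int.floordiv G b = G / b := PySem.Int.floordiv_eq_ediv_of_pos hb0
  simp only [pvPA, decide_eq_true_eq, PySem.Int.mod_eq_zero_iff_dvd, hfa] at haP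
  simp only [pvPA, decide_eq_true_eq, PySem.Int.mod_eq_zero_iff_dvd, hfb] at hbP
  obtain ⟨hda, hea, -⟩ := haP
  obtain ⟨hdb, heb, -⟩ := hbP
  have hGa : G / a * a = G := Int.ediv_mul_cancel hda
  have hGb : G / b * b = G := Int.ediv_mul_cancel hdb
  have habG : a * b < G := lt_of_lt_of_le (by nlinarith) hbsq
  have key : (G / a + a - (G / b + b)) * (a * b) = (G - a * b) * (b - a) := by
    linear_combination (b : Int) * hGa - a * hGb
  have hpos : (0:Int) < (G - a * b) * (b - a) :=
    mul_pos (by omega) (by omega)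
  have hlt : G / b + b < G / a + a := by nlinarith [key, hpos, mul_pos ha0 hb0]
  simp only [pvF, hfa, hfb, PySem.Int.floordiv_eq_ediv_of_pos (show (0:Int) < 2 by norm_num)]
  omega

lemma pv_pairwise (G : Int) (hG : 0 ≤ G) :
    (((PySem.List.pyRange 1 (Int.sqrt G + 1) 1).filter (pvPA G)).map (pvF G)).Pairwise
      (fun x y => y < x) := by
  rw [List.pairwise_map]
  refine List.Pairwise.imp_of_mem (fun {a b} ha hb hlt => pv_dec G a b hG ha hb hlt) ?_
  exact (PySem.List.pairwise_lt_pyRange_one 1 (Int.sqrt G + 1)).filter _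

-- membership in the singleton divisor list [1]
lemma pv_mem_one (d : Int) : d ∈ [(1:Int)] ↔ 0 < d ∧ d ∣ 1 := by
  simp only [List.mem_singleton]
  constructor
  · rintro rfl; exact ⟨one_pos, dvd_refl 1⟩
  · rintro ⟨hd0, hdd⟩
    rcases Int.isUnit_eq_one_or (isUnit_of_dvd_one hdd) with h | h
    · exact h
    · omega

-- ===== VERDICT (by name: the statement is the Claim_ definition above) =====
theorem find_current_weights_spec : Claim_equal_find_current_weights := by
  intro G _ hG
  show find_current_weights G = find_current_weights_alt G
  rcases eq_or_lt_of_le hG with h0 | hG1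
  · -- G = 0: both sides return [-1]
    subst h0
    have hf : pvFactor 0 2 [1] = (0, [1]) := by
      rw [pvFactor, dif_neg (by norm_num : ¬((2:Int) * 2 ≤ 0 ∧ (2:Int) ≤ 2))]
    have hB : find_current_weights_alt 0 = [-1] := by
      unfold find_current_weights_alt
      norm_num [show PySem.Int.mod 0 4 = 0 from by decide,
        show PySem.Int.mod 0 2 = 0 from by decide,
        show PySem.Int.floordiv 0 4 = 0 from by decide, hf,
        show PySem.Int.floordiv 0 1 = 0 from by decide]
    rw [hB, show find_current_weights 0 = [-1] from by decide]
  · have hG1' : 1 ≤ G := hG1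
    unfold find_current_weights find_current_weights_alt
    rw [pv_foldA]
    simp only [List.nil_append]
    by_cases hmod4 : PySem.Int.mod G 4 = 2
    · rw [if_pos hmod4]
      have hLAe : ((PySem.List.pyRange 1 (Int.sqrt G + 1) 1).filter (pvPA G)).map (pvF G)
          = [] := by
        rw [List.eq_nil_iff_forall_not_mem]
        intro x hx
        exact pv_no_sol_mod2 G x hmod4 ((pv_memA G x hG1').mp hx)
      rw [hLAe]
      simp
    · rw [if_neg hmod4]
      rw [pv_foldB]
      simp only [List.nil_append]
      have e2 : PySem.Int.mod G 2 = G % 2 :=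
        PySem.Int.mod_eq_emod_of_pos (by norm_num)
      have e4 : PySem.Int.mod G 4 = G % 4 :=
        PySem.Int.mod_eq_emod_of_pos (by norm_num)
      set K := if PySem.Int.mod G 2 ≠ 0 then G else PySem.Int.floordiv G 4 with hKdef
      rw [show (if 1 < (pvFactor K 2 [1]).1 then
          (pvFactor K 2 [1]).2 ++ List.map (fun d => d * (pvFactor K 2 [1]).1)
            (pvFactor K 2 [1]).2
        else (pvFactor K 2 [1]).2) = pvExt (pvFactor K 2 [1]) from rfl]
      have hcase : (PySem.Int.mod G 2 ≠ 0 ∧ K = G) ∨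
          (PySem.Int.mod G 2 = 0 ∧ PySem.Int.mod G 4 = 0 ∧
            K = PySem.Int.floordiv G 4) := by
        by_cases ho : PySem.Int.mod G 2 ≠ 0
        · exact Or.inl ⟨ho, by rw [hKdef, if_pos ho]⟩
        · rw [not_ne_iff] at ho
          refine Or.inr ⟨ho, ?_, by rw [hKdef, if_neg (fun hc => hc ho)]⟩
          rw [e2] at ho
          rw [e4] at hmod4 ⊢
          omega
      have hK1 : 1 ≤ K := by
        rcases hcase with ⟨-, hk⟩ | ⟨ho, h4, hk⟩
        · omega
        · rw [hk, PySem.Int.floordiv_eq_ediv_of_pos (by norm_num : (0:Int) < 4)]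
          rw [e4] at h4
          omega
      have hdiv : pvDivOK K (pvExt (pvFactor K 2 [1])) :=
        pvFactor_spec K 2 [1] K 1 hK1 (by norm_num) (by norm_num) (one_mul K)
          (isCoprime_one_left) (fun q h2 hq _ => by omega) pv_mem_one
          (List.nodup_singleton 1)
      obtain ⟨hBmem, hBnd⟩ := pv_memB G K _ hG1' hdiv hcase
      have hpwA := pv_pairwise G (by omega)
      have hperm : ((pvExt (pvFactor K 2 [1])).filter (pvCB K)).map (pvG G K) |>.Perm
          (((PySem.List.pyRange 1 (Int.sqrt G + 1) 1).filter (pvPA G)).map (pvF G)) :=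
        (List.perm_ext_iff_of_nodup hBnd (hpwA.imp fun h => ne_of_gt h)).mpr
          (fun a => (hBmem a).trans (pv_memA G a hG1').symm)
      by_cases hA : ((PySem.List.pyRange 1 (Int.sqrt G + 1) 1).filter (pvPA G)).map (pvF G)
          = []
      · rw [hA] at hperm ⊢
        rw [List.Perm.eq_nil hperm]
      · have hB : ((pvExt (pvFactor K 2 [1])).filter (pvCB K)).map (pvG G K) ≠ [] := by
          intro hc
          rw [hc] at hperm
          exact hA (List.Perm.eq_nil hperm.symm)
        rw [if_neg hA, if_neg hB]
        rw [PySem.List.sorted_eq_of_perm_of_pairwise_lt _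
            ((((PySem.List.pyRange 1 (Int.sqrt G + 1) 1).filter (pvPA G)).map (pvF G)).reverse)
            (fun x => x) (List.reverse_perm _) (List.pairwise_reverse.mpr hpwA),
          PySem.List.sorted_eq_of_perm_of_pairwise_lt _
            ((((PySem.List.pyRange 1 (Int.sqrt G + 1) 1).filter (pvPA G)).map (pvF G)).reverse)
            (fun x => x) ((List.reverse_perm _).trans hperm.symm)
            (List.pairwise_reverse.mpr hpwA)]
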